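-- pv_equiv track=rewrite | github.com/asigalov61/tegridy-tools | Examples/Orpheus_Music_Transformer_Gradio_App_Example.py | extract_pairs_and_prefix
-- ===== SOURCE A (Python) =====
-- def extract_pairs_and_prefix(lst):
--
--     RANGE1 = (0, 255)
--     RANGE2 = (256, 16767)
--     RANGE3 = (16768, 18815)
--     RANGE4 = (18816, 18819)
--
--     def in_range(x, r):
--         return r[0] <= x <= r[1]
--
--     prefix = []
--     started = False
--
--     for x in lst:
--         if in_range(x, RANGE2):
--             started = True
--             break
--
--         prefix.append(x)
--
--     pairs = []
--     pending = None
--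
--     for x in lst:
--         if in_range(x, RANGE2):
--             pending = x
--
--         elif in_range(x, RANGE3):
--             if pending is not None:
--                 pairs.append((pending, x))
--                 pending = None
--
--         elif in_range(x, RANGE4):
--             pairs.append((x, x))
--
--     return prefix, pairs
-- ===== SOURCE B (Python) =====
-- def extract_pairs_and_prefix(lst):
--     # Single fused pass: prefix collection and the pair state machine run together.
--     prefix = []
--     pairs = []
--     started = False
--     pending = None
--     for x in lst:
--         if not started:
--             if 256 <= x <= 16767:
--                 started = True
--             else:
--                 prefix.append(x)
--         if 256 <= x <= 16767:
--             pending = x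
--         elif 16768 <= x <= 18815:
--             if pending is not None:
--                 pairs.append((pending, x))
--                 pending = None
--         elif 18816 <= x <= 18819:
--             pairs.append((x, x))
--     return prefix, pairs
-- ===== Notes on version B (the rewrite author's own statement) =====
-- stated objective: faster
-- what changed: B fuses A's two traversals (a break-out prefix scan plus a full pair-machine scan) into one pass that maintains started/prefix/pairs/pending together, so the list is walked once instead of twice.
import Mathlib
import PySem

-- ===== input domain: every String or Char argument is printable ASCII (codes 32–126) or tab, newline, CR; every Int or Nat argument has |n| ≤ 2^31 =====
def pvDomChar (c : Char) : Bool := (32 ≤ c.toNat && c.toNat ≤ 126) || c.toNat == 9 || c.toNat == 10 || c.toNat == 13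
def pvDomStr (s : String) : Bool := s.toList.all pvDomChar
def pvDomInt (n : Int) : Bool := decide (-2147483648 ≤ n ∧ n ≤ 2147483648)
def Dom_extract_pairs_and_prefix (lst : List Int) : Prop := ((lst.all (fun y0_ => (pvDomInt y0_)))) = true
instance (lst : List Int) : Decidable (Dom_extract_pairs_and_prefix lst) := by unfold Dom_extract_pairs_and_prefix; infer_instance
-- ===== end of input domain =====

-- B fuses A's two traversals into one pass over the list; same results, proved equal.

-- ===== PORT A =====
-- A's first loop: append to prefix until an element in RANGE2 breaks the loop.
def epapPrefixA : List Int → List Int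
  | [] => []
  | x :: xs => if 256 ≤ x ∧ x ≤ 16767 then [] else x :: epapPrefixA xs

-- A's second loop: the pair state machine over (pairs, pending).
def epapStepA (st : List (Int × Int) × Option Int) (x : Int) : List (Int × Int) × Option Int :=
  if 256 ≤ x ∧ x ≤ 16767 then (st.1, some x)
  else if 16768 ≤ x ∧ x ≤ 18815 then
    match st.2 with
    | some p => (st.1 ++ [(p, x)], none)
    | none => (st.1, none)
  else if 18816 ≤ x ∧ x ≤ 18819 then (st.1 ++ [(x, x)], st.2)
  else st

def extract_pairs_and_prefix (lst : List Int) : List Int × (List (Int × Int)) :=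
  (epapPrefixA lst, (lst.foldl epapStepA ([], none)).1)

-- ===== PORT B =====
-- B's single fused step over state (started, prefix, pairs, pending).
def epapStepB (st : Bool × List Int × List (Int × Int) × Option Int) (x : Int) :
    Bool × List Int × List (Int × Int) × Option Int :=
  let sp : Bool × List Int :=
    if st.1 then (true, st.2.1)
    else if 256 ≤ x ∧ x ≤ 16767 then (true, st.2.1)
    else (false, st.2.1 ++ [x])
  let pp : List (Int × Int) × Option Int :=
    if 256 ≤ x ∧ x ≤ 16767 then (st.2.2.1, some x)
    else if 16768 ≤ x ∧ x ≤ 18815 then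
      match st.2.2.2 with
      | some p => (st.2.2.1 ++ [(p, x)], none)
      | none => (st.2.2.1, none)
    else if 18816 ≤ x ∧ x ≤ 18819 then (st.2.2.1 ++ [(x, x)], st.2.2.2)
    else st.2.2
  (sp.1, sp.2, pp)

def extract_pairs_and_prefix_alt (lst : List Int) : List Int × (List (Int × Int)) :=
  let r := lst.foldl epapStepB (false, [], [], none)
  (r.2.1, r.2.2.1)

-- ===== PRECONDITION & SPEC =====
def Spec_extract_pairs_and_prefix (lst : List Int) (out : List Int × (List (Int × Int))) : Prop := out = extract_pairs_and_prefix_alt lst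
instance (lst : List Int) (out : List Int × (List (Int × Int))) : Decidable (Spec_extract_pairs_and_prefix lst out) := by unfold Spec_extract_pairs_and_prefix; infer_instance

-- ===== CLAIM (what is proved, stated in full; the proofs are below) =====
def Claim_equal_extract_pairs_and_prefix : Prop := ∀ (lst : List Int), Dom_extract_pairs_and_prefix lst → Spec_extract_pairs_and_prefix lst (extract_pairs_and_prefix lst)

-- ===== LEMMAS AND PROOFS =====

-- Once started, B's fold leaves the prefix fixed and runs exactly A's pair machine.
theorem epapB_started (lst : List Int) : ∀ (pre : List Int) (st : List (Int × Int) × Option Int),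
    lst.foldl epapStepB (true, pre, st) = (true, pre, lst.foldl epapStepA st) := by
  induction lst with
  | nil => intro pre st; rfl
  | cons x xs ih =>
    intro pre st
    simp only [List.foldl_cons]
    rw [show epapStepB (true, pre, st) x = (true, pre, epapStepA st x) from by
      simp only [epapStepB, epapStepA]
      split_ifs <;> rcases st with ⟨ps, pd⟩ <;> cases pd <;> rfl]
    exact ih pre (epapStepA st x)

-- Before starting, B's fold extends the prefix by A's break-out scan and runs A's pair machine.
theorem epapB_not_started (lst : List Int) : ∀ (pre : List Int) (st : List (Int × Int) × Option Int),
    ∃ b : Bool, lst.foldl epapStepB (false, pre, st) = (b, pre ++ epapPrefixA lst, lst.foldl epapStepA st) := by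
  induction lst with
  | nil => intro pre st; exact ⟨false, by simp [epapPrefixA]⟩
  | cons x xs ih =>
    intro pre st
    simp only [List.foldl_cons, epapPrefixA]
    by_cases h : 256 ≤ x ∧ x ≤ 16767
    · refine ⟨true, ?_⟩
      rw [show epapStepB (false, pre, st) x = (true, pre, epapStepA st x) from by
        simp only [epapStepB, epapStepA]
        split_ifs <;> rcases st with ⟨ps, pd⟩ <;> cases pd <;> simp_all]
      rw [epapB_started xs pre (epapStepA st x)]
      simp [h]
    · rw [show epapStepB (false, pre, st) x = (false, pre ++ [x], epapStepA st x) from by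
        simp only [epapStepB, epapStepA]
        split_ifs <;> rcases st with ⟨ps, pd⟩ <;> cases pd <;> simp_all]
      obtain ⟨b, hb⟩ := ih (pre ++ [x]) (epapStepA st x)
      refine ⟨b, ?_⟩
      rw [hb]
      simp [h]

-- ===== VERDICT (by name: the statement is the Claim_ definition above) =====
theorem extract_pairs_and_prefix_spec : Claim_equal_extract_pairs_and_prefix := by
  intro lst _
  unfold Spec_extract_pairs_and_prefix extract_pairs_and_prefix extract_pairs_and_prefix_alt
  obtain ⟨b, hb⟩ := epapB_not_started lst [] ([], none)
  simp [hb]
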